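-- pv_equiv track=rewrite | github.com/AI-Security-Research-Group/strider | services/agents/agent.py | _categorize_by_stride
-- ===== SOURCE A (Python) =====
-- from typing import Dict, Any, Optional, List
--
-- def _categorize_by_stride(threats: List[Dict[str, Any]]) -> Dict[str, List[Dict[str, Any]]]:
--     """Categorize threats by STRIDE"""
--     categories = {
--         "Spoofing": [],
--         "Tampering": [],
--         "Repudiation": [],
--         "Information Disclosure": [],
--         "Denial of Service": [],
--         "Elevation of Privilege": []
--     }
--
--     for threat in threats:
--         category = threat.get('Threat Type')
--         if category in categories:
--             categories[category].append(threat)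
--
--     return categories
-- ===== SOURCE B (Python) =====
-- STRIDE_NAMES = [
--     "Spoofing",
--     "Tampering",
--     "Repudiation",
--     "Information Disclosure",
--     "Denial of Service",
--     "Elevation of Privilege",
-- ]
--
-- def _categorize_by_stride(threats):
--     """Categorize threats by STRIDE (category-outer comprehension)."""
--     return {name: [t for t in threats if t.get('Threat Type') == name]
--             for name in STRIDE_NAMES}
-- ===== Notes on version B (the rewrite author's own statement) =====
-- stated objective: idiomatic
-- what changed: Replaces the threat-outer dispatch loop that mutates a pre-built dict of six empty lists with a category-outer dict comprehension that filters the threat list once per fixed STRIDE name.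
import Mathlib
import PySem

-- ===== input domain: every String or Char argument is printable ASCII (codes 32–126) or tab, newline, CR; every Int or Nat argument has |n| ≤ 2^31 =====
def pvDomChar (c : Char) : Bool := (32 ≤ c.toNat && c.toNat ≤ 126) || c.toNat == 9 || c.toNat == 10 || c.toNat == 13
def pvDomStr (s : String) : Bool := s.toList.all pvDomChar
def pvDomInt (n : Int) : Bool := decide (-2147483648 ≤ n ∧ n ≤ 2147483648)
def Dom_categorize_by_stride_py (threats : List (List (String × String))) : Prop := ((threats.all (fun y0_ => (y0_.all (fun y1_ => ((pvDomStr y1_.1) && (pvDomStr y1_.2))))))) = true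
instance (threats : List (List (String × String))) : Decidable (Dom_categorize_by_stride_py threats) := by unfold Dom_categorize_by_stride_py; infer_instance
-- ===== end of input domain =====

-- B changes the decomposition (category-outer filtering instead of a threat-outer dispatch into a mutated dict); objective: idiomatic, no speed claim.

-- ===== PORT A =====
-- threat-outer loop: build the dict of six empty lists, then dispatch each threat into it
def categorize_by_stride_py (threats : List (List (String × String))) : List (String × List (List (String × String))) :=
  let categories : PySem.Dict String (List (List (String × String))) :=
    (((((PySem.Dict.empty.insert "Spoofing" []).insert "Tampering" []).insert "Repudiation"
      []).insert "Information Disclosure" []).insert "Denial of Service" []).insert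
      "Elevation of Privilege" []
  (threats.foldl (fun cats threat =>
    match (PySem.Dict.mk threat).get? "Threat Type" with
    | some c => if cats.contains c then cats.modify c [] (fun l => l ++ [threat]) else cats
    | none => cats) categories).items

-- ===== PORT B =====
def strideNames : List String :=
  ["Spoofing", "Tampering", "Repudiation", "Information Disclosure",
   "Denial of Service", "Elevation of Privilege"]

-- category-outer: one filter of the threat list per fixed STRIDE name
def categorize_by_stride_py_alt (threats : List (List (String × String))) : List (String × List (List (String × String))) :=
  strideNames.map (fun name =>
    (name, threats.filter (fun t => (PySem.Dict.mk t).get? "Threat Type" == some name)))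

-- ===== PRECONDITION & SPEC =====
def Spec_categorize_by_stride_py (threats : List (List (String × String))) (out : List (String × List (List (String × String)))) : Prop := out = categorize_by_stride_py_alt threats
instance (threats : List (List (String × String))) (out : List (String × List (List (String × String)))) : Decidable (Spec_categorize_by_stride_py threats out) := by unfold Spec_categorize_by_stride_py; infer_instance

-- ===== CLAIM (what is proved, stated in full; the proofs are below) =====
def Claim_equal_categorize_by_stride_py : Prop := ∀ (threats : List (List (String × String))), Dom_categorize_by_stride_py threats → Spec_categorize_by_stride_py threats (categorize_by_stride_py threats)

-- ===== LEMMAS AND PROOFS =====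

-- loop invariant for A's dispatch fold, over an arbitrary six-list state
lemma stride_loop_inv (ts : List (List (String × String)))
    (l1 l2 l3 l4 l5 l6 : List (List (String × String))) :
    (ts.foldl (fun cats threat =>
      match (PySem.Dict.mk threat).get? "Threat Type" with
      | some c => if cats.contains c then cats.modify c [] (fun l => l ++ [threat]) else cats
      | none => cats)
      (PySem.Dict.mk [("Spoofing", l1), ("Tampering", l2), ("Repudiation", l3),
        ("Information Disclosure", l4), ("Denial of Service", l5),
        ("Elevation of Privilege", l6)])).items
    = [("Spoofing", l1 ++ ts.filter (fun t => (PySem.Dict.mk t).get? "Threat Type" == some "Spoofing")),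
       ("Tampering", l2 ++ ts.filter (fun t => (PySem.Dict.mk t).get? "Threat Type" == some "Tampering")),
       ("Repudiation", l3 ++ ts.filter (fun t => (PySem.Dict.mk t).get? "Threat Type" == some "Repudiation")),
       ("Information Disclosure", l4 ++ ts.filter (fun t => (PySem.Dict.mk t).get? "Threat Type" == some "Information Disclosure")),
       ("Denial of Service", l5 ++ ts.filter (fun t => (PySem.Dict.mk t).get? "Threat Type" == some "Denial of Service")),
       ("Elevation of Privilege", l6 ++ ts.filter (fun t => (PySem.Dict.mk t).get? "Threat Type" == some "Elevation of Privilege"))] := by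
  induction ts generalizing l1 l2 l3 l4 l5 l6 with
  | nil => simp
  | cons t ts ih =>
    rcases hc : (PySem.Dict.mk t).get? "Threat Type" with _ | c
    · simp [List.foldl_cons, hc, ih]
    · by_cases h1 : c = "Spoofing"
      · subst h1
        simp only [List.foldl_cons, hc]
        simp [PySem.Dict.contains, PySem.Dict.modify, PySem.Dict.insert, PySem.Dict.getD, PySem.Dict.get?] at ih ⊢
        obtain ⟨k, hk⟩ : ∃ a, List.find? (fun p => p.1 == "Threat Type") t = some (a, _) := by simpa [PySem.Dict.get?] using hc
        simp only [ih]
        simp [hk, List.append_assoc]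
      · by_cases h2 : c = "Tampering"
        · subst h2
          simp only [List.foldl_cons, hc]
          simp [PySem.Dict.contains, PySem.Dict.modify, PySem.Dict.insert, PySem.Dict.getD, PySem.Dict.get?] at ih ⊢
          obtain ⟨k, hk⟩ : ∃ a, List.find? (fun p => p.1 == "Threat Type") t = some (a, _) := by simpa [PySem.Dict.get?] using hc
          simp only [ih]
          simp [hk, List.append_assoc]
        · by_cases h3 : c = "Repudiation"
          · subst h3
            simp only [List.foldl_cons, hc]
            simp [PySem.Dict.contains, PySem.Dict.modify, PySem.Dict.insert, PySem.Dict.getD, PySem.Dict.get?] at ih ⊢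
            obtain ⟨k, hk⟩ : ∃ a, List.find? (fun p => p.1 == "Threat Type") t = some (a, _) := by simpa [PySem.Dict.get?] using hc
            simp only [ih]
            simp [hk, List.append_assoc]
          · by_cases h4 : c = "Information Disclosure"
            · subst h4
              simp only [List.foldl_cons, hc]
              simp [PySem.Dict.contains, PySem.Dict.modify, PySem.Dict.insert, PySem.Dict.getD, PySem.Dict.get?] at ih ⊢
              obtain ⟨k, hk⟩ : ∃ a, List.find? (fun p => p.1 == "Threat Type") t = some (a, _) := by simpa [PySem.Dict.get?] using hc
              simp only [ih]
              simp [hk, List.append_assoc]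
            · by_cases h5 : c = "Denial of Service"
              · subst h5
                simp only [List.foldl_cons, hc]
                simp [PySem.Dict.contains, PySem.Dict.modify, PySem.Dict.insert, PySem.Dict.getD, PySem.Dict.get?] at ih ⊢
                obtain ⟨k, hk⟩ : ∃ a, List.find? (fun p => p.1 == "Threat Type") t = some (a, _) := by simpa [PySem.Dict.get?] using hc
                simp only [ih]
                simp [hk, List.append_assoc]
              · by_cases h6 : c = "Elevation of Privilege"
                · subst h6
                  simp only [List.foldl_cons, hc]
                  simp [PySem.Dict.contains, PySem.Dict.modify, PySem.Dict.insert, PySem.Dict.getD, PySem.Dict.get?] at ih ⊢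
                  obtain ⟨k, hk⟩ : ∃ a, List.find? (fun p => p.1 == "Threat Type") t = some (a, _) := by simpa [PySem.Dict.get?] using hc
                  simp only [ih]
                  simp [hk, List.append_assoc]
                · have hcon : (PySem.Dict.mk [("Spoofing", l1), ("Tampering", l2), ("Repudiation", l3),
                      ("Information Disclosure", l4), ("Denial of Service", l5),
                      ("Elevation of Privilege", l6)]).contains c = false := by
                    simp [PySem.Dict.contains, Ne.symm h1, Ne.symm h2, Ne.symm h3, Ne.symm h4, Ne.symm h5, Ne.symm h6]
                  simp [List.foldl_cons, hc, hcon, h1, h2, h3, h4, h5, h6, ih]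

-- ===== VERDICT (by name: the statement is the Claim_ definition above) =====
theorem categorize_by_stride_py_spec : Claim_equal_categorize_by_stride_py := by
  intro threats _
  unfold Spec_categorize_by_stride_py categorize_by_stride_py categorize_by_stride_py_alt strideNames
  have h := stride_loop_inv threats [] [] [] [] [] []
  simp only [PySem.Dict.empty, PySem.Dict.insert] at *
  simpa using h
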